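-- pv_equiv track=rewrite | github.com/Michiel29/graphqa | utils/logging_utils.py | reduce_macro_mcm
-- ===== SOURCE A (Python) =====
-- import collections
--
-- def reduce_macro_mcm(logging_outputs, num_classes, prefix):
--     fn = collections.defaultdict(int)
--     tp = collections.defaultdict(int)
--     fp = collections.defaultdict(int)
--     for i in range(num_classes):
--         fn[i] = sum(log.get(prefix + 'fn_' + str(i), 0) for log in logging_outputs)
--         tp[i] = sum(log.get(prefix + 'tp_' + str(i), 0) for log in logging_outputs)
--         fp[i] = sum(log.get(prefix + 'fp_' + str(i), 0) for log in logging_outputs)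
--     return fn, tp, fp
-- ===== SOURCE B (Python) =====
-- import collections
--
-- def reduce_macro_mcm(logging_outputs, num_classes, prefix):
--     # One pass over logging_outputs (instead of 3*num_classes scans):
--     # precompute the three keys per class, keep a running (fn, tp, fp) triple per class.
--     keys = [(prefix + 'fn_' + str(i), prefix + 'tp_' + str(i), prefix + 'fp_' + str(i))
--             for i in range(num_classes)]
--     sums = [(0, 0, 0)] * len(keys)
--     for log in logging_outputs:
--         sums = [(a + log.get(kf, 0), b + log.get(kt, 0), c + log.get(kp, 0))
--                 for (a, b, c), (kf, kt, kp) in zip(sums, keys)]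
--     fn = collections.defaultdict(int, {i: a for i, (a, _, _) in enumerate(sums)})
--     tp = collections.defaultdict(int, {i: b for i, (_, b, _) in enumerate(sums)})
--     fp = collections.defaultdict(int, {i: c for i, (_, _, c) in enumerate(sums)})
--     return fn, tp, fp
-- ===== Notes on version B (the rewrite author's own statement) =====
-- stated objective: faster
-- what changed: A scans logging_outputs 3*num_classes times (one generator-sum per counter per class); B precomputes the three keys per class once and makes a single pass over logging_outputs, keeping a running (fn,tp,fp) triple per class, then splits the triples into the three dicts.
import Mathlib
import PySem

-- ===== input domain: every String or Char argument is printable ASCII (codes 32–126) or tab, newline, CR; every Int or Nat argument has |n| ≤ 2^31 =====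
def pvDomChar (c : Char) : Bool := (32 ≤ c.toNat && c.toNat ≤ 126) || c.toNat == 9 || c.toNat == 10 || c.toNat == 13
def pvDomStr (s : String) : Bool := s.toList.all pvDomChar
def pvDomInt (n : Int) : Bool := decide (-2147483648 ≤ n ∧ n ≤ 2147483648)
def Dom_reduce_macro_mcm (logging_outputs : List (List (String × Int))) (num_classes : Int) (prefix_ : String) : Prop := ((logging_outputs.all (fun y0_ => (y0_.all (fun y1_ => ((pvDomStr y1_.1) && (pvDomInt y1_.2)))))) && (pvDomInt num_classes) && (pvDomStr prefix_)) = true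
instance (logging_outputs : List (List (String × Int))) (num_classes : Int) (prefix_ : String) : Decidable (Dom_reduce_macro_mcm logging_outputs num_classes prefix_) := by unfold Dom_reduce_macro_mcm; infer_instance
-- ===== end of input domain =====

-- B makes ONE pass over logging_outputs with per-class running (fn,tp,fp) triples instead of
-- A's 3*num_classes separate generator-sum scans of logging_outputs; same results, measured faster in a timing run.

-- ===== PORT A =====
def reduce_macro_mcm (logging_outputs : List (List (String × Int))) (num_classes : Int) (prefix_ : String) : (List (Int × Int)) × (List (Int × Int)) × (List (Int × Int)) :=
  -- for i in range(num_classes): fn[i] = sum(...); tp[i] = sum(...); fp[i] = sum(...)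
  let s := (PySem.List.pyRange 0 num_classes).foldl
    (fun (s : PySem.Dict Int Int × PySem.Dict Int Int × PySem.Dict Int Int) i =>
      (s.1.insert i ((logging_outputs.map (fun log =>
          (PySem.Dict.mk log).getD (prefix_ ++ "fn_" ++ PySem.Int.toStr i) 0)).sum),
       s.2.1.insert i ((logging_outputs.map (fun log =>
          (PySem.Dict.mk log).getD (prefix_ ++ "tp_" ++ PySem.Int.toStr i) 0)).sum),
       s.2.2.insert i ((logging_outputs.map (fun log =>
          (PySem.Dict.mk log).getD (prefix_ ++ "fp_" ++ PySem.Int.toStr i) 0)).sum)))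
    (PySem.Dict.empty, PySem.Dict.empty, PySem.Dict.empty)
  (s.1.items, s.2.1.items, s.2.2.items)

-- ===== PORT B =====
def reduce_macro_mcm_alt (logging_outputs : List (List (String × Int))) (num_classes : Int) (prefix_ : String) : (List (Int × Int)) × (List (Int × Int)) × (List (Int × Int)) :=
  -- keys = [(prefix+'fn_'+str(i), prefix+'tp_'+str(i), prefix+'fp_'+str(i)) for i in range(num_classes)]
  let keys := (PySem.List.pyRange 0 num_classes).map (fun i =>
      (prefix_ ++ "fn_" ++ PySem.Int.toStr i,
       prefix_ ++ "tp_" ++ PySem.Int.toStr i,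
       prefix_ ++ "fp_" ++ PySem.Int.toStr i))
  -- sums = [(0,0,0)] * len(keys); one pass: for log in logging_outputs: sums = [... for ... in zip(sums, keys)]
  let sums := logging_outputs.foldl
    (fun s log => List.zipWith (fun (t : Int × Int × Int) (k : String × String × String) =>
        (t.1 + (PySem.Dict.mk log).getD k.1 0,
         t.2.1 + (PySem.Dict.mk log).getD k.2.1 0,
         t.2.2 + (PySem.Dict.mk log).getD k.2.2 0)) s keys)
    (PySem.List.pyRepeat [((0:Int), (0:Int), (0:Int))] (keys.length : Int))
  -- fn = {i: a for i, (a,_,_) in enumerate(sums)}  (and likewise tp, fp)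
  let fn := PySem.Dict.ofList ((PySem.List.enumerate sums).map (fun p => (p.1, p.2.1)))
  let tp := PySem.Dict.ofList ((PySem.List.enumerate sums).map (fun p => (p.1, p.2.2.1)))
  let fp := PySem.Dict.ofList ((PySem.List.enumerate sums).map (fun p => (p.1, p.2.2.2)))
  (fn.items, tp.items, fp.items)

-- ===== PRECONDITION & SPEC =====
def Spec_reduce_macro_mcm (logging_outputs : List (List (String × Int))) (num_classes : Int) (prefix_ : String) (out : (List (Int × Int)) × (List (Int × Int)) × (List (Int × Int))) : Prop := out = reduce_macro_mcm_alt logging_outputs num_classes prefix_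
instance (logging_outputs : List (List (String × Int))) (num_classes : Int) (prefix_ : String) (out : (List (Int × Int)) × (List (Int × Int)) × (List (Int × Int))) : Decidable (Spec_reduce_macro_mcm logging_outputs num_classes prefix_ out) := by unfold Spec_reduce_macro_mcm; infer_instance

-- ===== CLAIM (what is proved, stated in full; the proofs are below) =====
def Claim_equal_reduce_macro_mcm : Prop := ∀ (logging_outputs : List (List (String × Int))) (num_classes : Int) (prefix_ : String), Dom_reduce_macro_mcm logging_outputs num_classes prefix_ → Spec_reduce_macro_mcm logging_outputs num_classes prefix_ (reduce_macro_mcm logging_outputs num_classes prefix_)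

-- ===== LEMMAS AND PROOFS =====

-- range(n) in Int form is the cast image of List.range n.toNat
lemma pyRange_eq_cast_range (n : Int) :
    PySem.List.pyRange 0 n = (List.range n.toNat).map (fun k : Nat => (k : Int)) := by
  rcases (by omega : 0 ≤ n ∨ n < 0) with h | h
  · conv_lhs => rw [show n = ((n.toNat : Nat) : Int) from (Int.toNat_of_nonneg h).symm]
    exact PySem.List.pyRange_zero_natCast n.toNat
  · rw [show n.toNat = 0 from Int.toNat_of_nonpos h.le]
    simp [PySem.List.pyRange]
    omega

-- B's one-pass zipWith fold over the logs computes, per key, the fold over the logs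
lemma foldl_zipWith_map {L K T : Type} (logs : List L) (keys : List K)
    (upd : T → K → L → T) (c : K → T) :
    logs.foldl (fun s log => List.zipWith (fun t k => upd t k log) s keys) (keys.map c)
      = keys.map (fun k => logs.foldl (fun t log => upd t k log) (c k)) := by
  induction logs generalizing c with
  | nil => rfl
  | cons log rest ih =>
    simp only [List.foldl_cons, List.zipWith_map_left, List.zipWith_self]
    exact ih (fun k => upd (c k) k log)

-- enumerating a map over the cast range recovers the indices
lemma enumerate_map_cast_range {T : Type} (m : Nat) (F : Int → T) :
    PySem.List.enumerate (((List.range m).map (fun k : Nat => (k : Int))).map F)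
      = (List.range m).map (fun k : Nat => ((k : Int), F (k : Int))) := by
  apply List.ext_getElem
  · simp [PySem.List.length_enumerate]
  · intro j h1 h2
    simp only [PySem.List.getElem_enumerate, List.getElem_map, List.getElem_range]
    simp

-- a dict built from pairs with distinct keys lists exactly those pairs
lemma items_ofList_of_nodup_fst {κ ν : Type} [BEq κ] [LawfulBEq κ]
    (ps : List (κ × ν)) (h : (ps.map (·.1)).Nodup) :
    (PySem.Dict.ofList ps).items = ps := by
  show (ps.foldl (fun acc p => acc.insert p.1 p.2) PySem.Dict.empty).items = ps
  rw [PySem.Dict.items_foldl_insert_fresh ps (·.1) (·.2) PySem.Dict.empty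
      (fun a _ => PySem.Dict.contains_empty a.1) h]
  simp [PySem.Dict.empty]

lemma nodup_cast_range (m : Nat) : ((List.range m).map (fun k : Nat => (k : Int))).Nodup :=
  List.Nodup.map (fun a b h => by exact_mod_cast h) List.nodup_range

-- ===== VERDICT (by name: the statement is the Claim_ definition above) =====
theorem reduce_macro_mcm_spec : Claim_equal_reduce_macro_mcm := by
  intro logs n pre _
  unfold Spec_reduce_macro_mcm reduce_macro_mcm reduce_macro_mcm_alt
  simp only []
  rw [pyRange_eq_cast_range]
  set m := n.toNat with hm
  set r := (List.range m).map (fun k : Nat => (k : Int)) with hr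
  -- A: split the triple-dict fold into three dict folds, each over fresh distinct keys
  rw [PySem.List.foldl_prod_mk
        (f := fun (d : PySem.Dict Int Int) i => d.insert i ((logs.map (fun log =>
          (PySem.Dict.mk log).getD (pre ++ "fn_" ++ PySem.Int.toStr i) 0)).sum))
        (g := fun (s : PySem.Dict Int Int × PySem.Dict Int Int) i =>
          (s.1.insert i ((logs.map (fun log =>
            (PySem.Dict.mk log).getD (pre ++ "tp_" ++ PySem.Int.toStr i) 0)).sum),
           s.2.insert i ((logs.map (fun log =>
            (PySem.Dict.mk log).getD (pre ++ "fp_" ++ PySem.Int.toStr i) 0)).sum)))]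
  rw [PySem.List.foldl_prod_mk
        (f := fun (d : PySem.Dict Int Int) i => d.insert i ((logs.map (fun log =>
          (PySem.Dict.mk log).getD (pre ++ "tp_" ++ PySem.Int.toStr i) 0)).sum))
        (g := fun (d : PySem.Dict Int Int) i => d.insert i ((logs.map (fun log =>
          (PySem.Dict.mk log).getD (pre ++ "fp_" ++ PySem.Int.toStr i) 0)).sum))]
  have hfresh : ∀ a ∈ r, (PySem.Dict.empty : PySem.Dict Int Int).contains a = false :=
    fun a _ => PySem.Dict.contains_empty a
  have hnd : (r.map (fun i => i)).Nodup := by simpa [hr] using nodup_cast_range m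
  rw [PySem.Dict.items_foldl_insert_fresh r (fun i => i) _ PySem.Dict.empty hfresh hnd,
      PySem.Dict.items_foldl_insert_fresh r (fun i => i) _ PySem.Dict.empty hfresh hnd,
      PySem.Dict.items_foldl_insert_fresh r (fun i => i) _ PySem.Dict.empty hfresh hnd]
  -- B: the initial [(0,0,0)]*len(keys) is keys.map (const (0,0,0))
  have hinit : PySem.List.pyRepeat [((0:Int), (0:Int), (0:Int))]
        (((r.map (fun i => (pre ++ "fn_" ++ PySem.Int.toStr i, pre ++ "tp_" ++ PySem.Int.toStr i,
          pre ++ "fp_" ++ PySem.Int.toStr i))).length : Nat) : Int)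
      = (r.map (fun i => (pre ++ "fn_" ++ PySem.Int.toStr i, pre ++ "tp_" ++ PySem.Int.toStr i,
          pre ++ "fp_" ++ PySem.Int.toStr i))).map (fun _ => ((0:Int), (0:Int), (0:Int))) := by
    rw [PySem.List.pyRepeat_singleton, Int.toNat_natCast, List.map_const']
  rw [hinit, foldl_zipWith_map logs _
        (fun (t : Int × Int × Int) (k : String × String × String) log =>
          (t.1 + (PySem.Dict.mk log).getD k.1 0,
           t.2.1 + (PySem.Dict.mk log).getD k.2.1 0,
           t.2.2 + (PySem.Dict.mk log).getD k.2.2 0))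
        (fun _ => ((0:Int), (0:Int), (0:Int)))]
  -- split B's per-key triple fold into three sums
  have hsum : ∀ k : String × String × String,
      logs.foldl (fun (t : Int × Int × Int) log =>
          (t.1 + (PySem.Dict.mk log).getD k.1 0,
           t.2.1 + (PySem.Dict.mk log).getD k.2.1 0,
           t.2.2 + (PySem.Dict.mk log).getD k.2.2 0)) ((0:Int), (0:Int), (0:Int))
        = ((logs.map (fun log => (PySem.Dict.mk log).getD k.1 0)).sum,
           (logs.map (fun log => (PySem.Dict.mk log).getD k.2.1 0)).sum,
           (logs.map (fun log => (PySem.Dict.mk log).getD k.2.2 0)).sum) := by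
    intro k
    rw [PySem.List.foldl_prod_mk
          (f := fun (a : Int) log => a + (PySem.Dict.mk log).getD k.1 0)
          (g := fun (t : Int × Int) log =>
            (t.1 + (PySem.Dict.mk log).getD k.2.1 0, t.2 + (PySem.Dict.mk log).getD k.2.2 0)),
        PySem.List.foldl_prod_mk
          (f := fun (a : Int) log => a + (PySem.Dict.mk log).getD k.2.1 0)
          (g := fun (a : Int) log => a + (PySem.Dict.mk log).getD k.2.2 0),
        PySem.List.foldl_add, PySem.List.foldl_add, PySem.List.foldl_add]
    simp
  simp only [List.map_map, hsum]
  rw [hr, enumerate_map_cast_range]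
  rw [items_ofList_of_nodup_fst _ (by simpa using nodup_cast_range m),
      items_ofList_of_nodup_fst _ (by simpa using nodup_cast_range m),
      items_ofList_of_nodup_fst _ (by simpa using nodup_cast_range m)]
  simp [PySem.Dict.empty, Function.comp]
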